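-- pv_equiv track=rewrite | github.com/ministar99/monglepick-recommend | app/v2/service/favorite_movie_service.py | _normalize_movie_ids
-- ===== SOURCE A (Python) =====
-- def _normalize_movie_ids(movie_ids: list[str]) -> list[str]:
--     """빈 값 제거와 중복 검사를 수행합니다."""
--     normalized_ids: list[str] = []
--     seen: set[str] = set()
--
--     for raw_movie_id in movie_ids:
--         movie_id = str(raw_movie_id).strip()
--         if not movie_id:
--             continue
--         if movie_id in seen:
--             raise ValueError("같은 영화를 중복해서 저장할 수 없습니다.")
--         seen.add(movie_id)
--         normalized_ids.append(movie_id)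
--
--     return normalized_ids
-- ===== SOURCE B (Python) =====
-- def _normalize_movie_ids(movie_ids: list[str]) -> list[str]:
--     """빈 값 제거와 중복 검사를 수행합니다."""
--     cleaned = [s for raw in movie_ids if (s := str(raw).strip())]
--     if len(set(cleaned)) != len(cleaned):
--         raise ValueError("같은 영화를 중복해서 저장할 수 없습니다.")
--     return cleaned
-- ===== Notes on version B (the rewrite author's own statement) =====
-- stated objective: simpler
-- what changed: Replaces A's single loop with a per-element seen-set membership test and in-loop raise by a one-pass cleaning comprehension followed by a single global set-cardinality duplicate check.
-- outside the precondition, e.g. on _normalize_movie_ids([' a ', 'a']): A raises ValueError, B raises ValueError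
import Mathlib
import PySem

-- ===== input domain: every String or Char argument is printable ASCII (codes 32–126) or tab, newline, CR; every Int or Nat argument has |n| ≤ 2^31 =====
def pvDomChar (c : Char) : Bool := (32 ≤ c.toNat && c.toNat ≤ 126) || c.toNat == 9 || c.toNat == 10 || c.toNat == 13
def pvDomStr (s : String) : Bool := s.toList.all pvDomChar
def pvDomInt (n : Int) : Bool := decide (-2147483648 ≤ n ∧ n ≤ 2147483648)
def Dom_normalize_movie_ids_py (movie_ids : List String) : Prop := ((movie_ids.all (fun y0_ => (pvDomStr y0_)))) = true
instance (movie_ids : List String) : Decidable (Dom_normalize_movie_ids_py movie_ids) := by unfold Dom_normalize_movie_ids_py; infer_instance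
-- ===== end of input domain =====

-- B replaces A's in-loop seen-set membership test and early raise by a cleaning
-- comprehension plus one global set-cardinality duplicate check (objective: simpler).


-- ===== PORT A =====
-- A's loop: carries normalized_ids and the seen set; on a duplicate Python raises
-- ValueError — that input is excluded by Pre_, the port returns the accumulator there.
def normA (seen : PySem.Set String) (acc : List String) : List String → List String
  | [] => acc
  | raw :: rest =>
      let movie_id := PySem.Str.strip raw
      if movie_id = "" then normA seen acc rest
      else if PySem.Set.contains seen movie_id then acc  -- Python: raise ValueError (outside Pre_)
      else normA (PySem.Set.add seen movie_id) (acc ++ [movie_id]) rest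

def normalize_movie_ids_py (movie_ids : List String) : List String :=
  normA PySem.Set.empty [] movie_ids

-- ===== PORT B =====
def normalize_movie_ids_py_alt (movie_ids : List String) : List String :=
  let cleaned := (movie_ids.map PySem.Str.strip).filter (fun s => s ≠ "")
  if (PySem.Set.ofList cleaned).length ≠ cleaned.length then []  -- Python: raise ValueError (outside Pre_)
  else cleaned

-- ===== PRECONDITION & SPEC =====
-- Pre_ excludes exactly the inputs where A (and B) raise ValueError: a repeated
-- non-empty stripped movie id.
def Pre_normalize_movie_ids_py (movie_ids : List String) : Prop :=
  ((movie_ids.map PySem.Str.strip).filter (fun s => s ≠ "")).Nodup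
instance (movie_ids : List String) : Decidable (Pre_normalize_movie_ids_py movie_ids) := by unfold Pre_normalize_movie_ids_py; infer_instance

def pvWitness_normalize_movie_ids_py : List String := [" a ", "b", " ", "c"]

def Spec_normalize_movie_ids_py (movie_ids : List String) (out : List String) : Prop := out = normalize_movie_ids_py_alt movie_ids
instance (movie_ids : List String) (out : List String) : Decidable (Spec_normalize_movie_ids_py movie_ids out) := by unfold Spec_normalize_movie_ids_py; infer_instance

-- ===== CLAIM (what is proved, stated in full; the proofs are below) =====
def Claim_equal_normalize_movie_ids_py : Prop := ∀ (movie_ids : List String), Dom_normalize_movie_ids_py movie_ids → Pre_normalize_movie_ids_py movie_ids → Spec_normalize_movie_ids_py movie_ids (normalize_movie_ids_py movie_ids)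

-- ===== LEMMAS AND PROOFS =====
-- Invariant of A's loop: when the remaining cleaned ids are duplicate-free and
-- disjoint from `seen`, the loop appends exactly the cleaned list.
theorem normA_eq (l : List String) : ∀ (seen : PySem.Set String) (acc : List String),
    ((l.map PySem.Str.strip).filter (fun s => s ≠ "")).Nodup →
    (∀ s ∈ (l.map PySem.Str.strip).filter (fun s => s ≠ ""), s ∉ seen) →
    normA seen acc l = acc ++ (l.map PySem.Str.strip).filter (fun s => s ≠ "") := by
  induction l with
  | nil => intro seen acc _ _; simp [normA]
  | cons raw rest ih =>
    intro seen acc hnd hdis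
    by_cases h0 : PySem.Str.strip raw = ""
    · have hfe : ((raw :: rest).map PySem.Str.strip).filter (fun s => s ≠ "") =
          (rest.map PySem.Str.strip).filter (fun s => s ≠ "") := by simp [h0]
      rw [hfe] at hnd hdis ⊢
      rw [show normA seen acc (raw :: rest) = normA seen acc rest from by simp [normA, h0]]
      exact ih seen acc hnd hdis
    · have hfe : ((raw :: rest).map PySem.Str.strip).filter (fun s => s ≠ "") =
          PySem.Str.strip raw :: (rest.map PySem.Str.strip).filter (fun s => s ≠ "") := by
        simp [h0]
      rw [hfe] at hnd hdis ⊢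
      have hmem : PySem.Str.strip raw ∉ seen := hdis _ (List.mem_cons_self ..)
      have hcon : PySem.Set.contains seen (PySem.Str.strip raw) = false := by
        rw [← Bool.not_eq_true, PySem.Set.contains_iff]; exact hmem
      rw [show normA seen acc (raw :: rest) =
            normA (PySem.Set.add seen (PySem.Str.strip raw)) (acc ++ [PySem.Str.strip raw]) rest
          from by simp [normA, h0, hmem]]
      obtain ⟨hnotin, hnd'⟩ := List.nodup_cons.mp hnd
      rw [ih (PySem.Set.add seen (PySem.Str.strip raw)) (acc ++ [PySem.Str.strip raw]) hnd' ?_]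
      · simp
      · intro s hs
        rw [PySem.Set.mem_add]
        push Not
        exact ⟨fun hin => (hdis s (List.mem_cons_of_mem _ hs)) hin,
               fun heq => hnotin (heq ▸ hs)⟩

-- B returns the cleaned list when it is duplicate-free (set has full cardinality).
theorem alt_eq (movie_ids : List String)
    (h : ((movie_ids.map PySem.Str.strip).filter (fun s => s ≠ "")).Nodup) :
    normalize_movie_ids_py_alt movie_ids =
      (movie_ids.map PySem.Str.strip).filter (fun s => s ≠ "") := by
  rw [show normalize_movie_ids_py_alt movie_ids =
        (if (PySem.Set.ofList ((movie_ids.map PySem.Str.strip).filter (fun s => s ≠ ""))).length ≠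
            ((movie_ids.map PySem.Str.strip).filter (fun s => s ≠ "")).length then []
         else (movie_ids.map PySem.Str.strip).filter (fun s => s ≠ "")) from rfl,
      PySem.Set.ofList_eq_self_of_nodup _ h, if_neg (by simp)]

-- ===== VERDICT (by name: the statement is the Claim_ definition above) =====
theorem normalize_movie_ids_py_spec : Claim_equal_normalize_movie_ids_py := by
  intro movie_ids _ hpre
  unfold Spec_normalize_movie_ids_py normalize_movie_ids_py
  rw [normA_eq movie_ids PySem.Set.empty [] hpre (by intro s _; simp [PySem.Set.empty]),
    alt_eq movie_ids hpre]
  simp
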